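-- pv_equiv track=rewrite | github.com/NCPP/ocgis | src/ocgis/util/helpers.py | get_by_key_list
-- ===== SOURCE A (Python) =====
-- def get_by_key_list(src, keys):
--     found = False
--     ret = None
--     for key in keys:
--         if key in src:
--             if found:
--                 raise ValueError('Key already found in source.')
--             else:
--                 found = True
--                 ret = src[key]
--     return ret
-- ===== SOURCE B (Python) =====
-- def get_by_key_list(src, keys):
--     wanted = set(keys)
--     matches = [v for k, v in src.items() if k in wanted]
--     if len(matches) > 1:
--         raise ValueError('Key already found in source.')
--     return matches[0] if matches else None
-- ===== Notes on version B (the rewrite author's own statement) =====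
-- stated objective: alternative
-- what changed: Inverts the traversal: instead of probing the dict once per key with a found-flag, B builds a set of the wanted keys and scans the source dict's items in a single pass, collecting matching values and checking the count.
-- crash fix: When keys lists the same present key more than once (e.g. keys=['b','b']) but only one src item matches, A raises ValueError while B, which deduplicates keys into a set, returns that item's value. — e.g. on get_by_key_list([("b", 1)], ["b", "b"]): A raises ValueError, B returns some 1
import Mathlib
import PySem

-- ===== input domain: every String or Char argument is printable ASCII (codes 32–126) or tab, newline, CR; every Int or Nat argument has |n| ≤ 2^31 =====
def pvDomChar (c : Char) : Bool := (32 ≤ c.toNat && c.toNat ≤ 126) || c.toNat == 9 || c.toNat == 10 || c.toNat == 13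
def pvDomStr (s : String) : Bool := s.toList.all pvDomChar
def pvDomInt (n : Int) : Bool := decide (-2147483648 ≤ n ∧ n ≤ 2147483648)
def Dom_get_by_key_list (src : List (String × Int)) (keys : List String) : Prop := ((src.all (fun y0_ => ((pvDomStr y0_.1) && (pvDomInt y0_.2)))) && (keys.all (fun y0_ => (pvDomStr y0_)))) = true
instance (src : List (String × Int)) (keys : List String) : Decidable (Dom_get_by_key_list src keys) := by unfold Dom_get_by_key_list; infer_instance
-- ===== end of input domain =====

-- B inverts the traversal: instead of probing the dict once per key with a found-flag, it builds a set of the wanted keys and scans the source dict's items in a single pass (alternative decomposition, same cost).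

-- ===== PORT A =====
-- dict lookup on the association list: first matching key (Python dicts have unique keys)
def pvLookup? (src : List (String × Int)) (k : String) : Option Int :=
  (src.find? (fun p => p.1 == k)).map Prod.snd

-- A's loop over keys carrying (found, ret); `none` from the loop encodes the ValueError raise (excluded by Pre_).
def getByKeyListLoop (src : List (String × Int)) : List String → Bool → Option Int → Option (Option Int)
  | [], _, ret => some ret
  | k :: ks, found, ret =>
    match pvLookup? src k with
    | some v => if found then none else getByKeyListLoop src ks true (some v)
    | none => getByKeyListLoop src ks found ret

def get_by_key_list (src : List (String × Int)) (keys : List String) : Option Int :=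
  match getByKeyListLoop src keys false none with
  | some ret => ret
  | none => none

-- ===== PORT B =====
def get_by_key_list_alt (src : List (String × Int)) (keys : List String) : Option Int :=
  let wanted : PySem.Set String := PySem.Set.ofList keys
  let ms := src.filterMap (fun p => if PySem.Set.contains wanted p.1 then some p.2 else none)
  if 1 < ms.length then none   -- the raise branch, excluded by Pre_
  else ms.head?

-- ===== PRECONDITION & SPEC =====
-- First conjunct excludes exactly the inputs where more than one entry of `keys` hits `src`: there A raises ValueError.
-- Second conjunct says `src` is a well-formed dict (Python dicts cannot carry duplicate keys, so no Python input is excluded by it).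
def Pre_get_by_key_list (src : List (String × Int)) (keys : List String) : Prop :=
  (keys.filterMap (fun k => pvLookup? src k)).length ≤ 1 ∧ (src.map Prod.fst).Nodup
instance (src : List (String × Int)) (keys : List String) : Decidable (Pre_get_by_key_list src keys) := by unfold Pre_get_by_key_list; infer_instance
def pvWitness_get_by_key_list : (List (String × Int)) × List String := ([("a", 3), ("b", 4)], ["x", "b"])

-- A raises ValueError when `keys` lists the same present key twice but only one src item matches; B, which deduplicates keys into a set, returns that item's value.
def Raises_get_by_key_list (src : List (String × Int)) (keys : List String) : Prop :=
  2 ≤ (keys.filterMap (fun k => pvLookup? src k)).length ∧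
  (src.filter (fun p => keys.contains p.1)).length ≤ 1
instance (src : List (String × Int)) (keys : List String) : Decidable (Raises_get_by_key_list src keys) := by unfold Raises_get_by_key_list; infer_instance
def pvRaiseWitness_get_by_key_list : (List (String × Int)) × List String := ([("b", 1)], ["b", "b"])
def pvRaiseWitnessOut_get_by_key_list : Option Int := some 1

def Spec_get_by_key_list (src : List (String × Int)) (keys : List String) (out : Option Int) : Prop := out = get_by_key_list_alt src keys
instance (src : List (String × Int)) (keys : List String) (out : Option Int) : Decidable (Spec_get_by_key_list src keys out) := by unfold Spec_get_by_key_list; infer_instance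

-- ===== CLAIM (what is proved, stated in full; the proofs are below) =====
def Claim_equal_get_by_key_list : Prop := ∀ (src : List (String × Int)) (keys : List String), Dom_get_by_key_list src keys → Pre_get_by_key_list src keys → Spec_get_by_key_list src keys (get_by_key_list src keys)
def Claim_raises_get_by_key_list : Prop := (∀ (src : List (String × Int)) (keys : List String), Dom_get_by_key_list src keys → Raises_get_by_key_list src keys → ¬ Pre_get_by_key_list src keys) ∧ (Dom_get_by_key_list (pvRaiseWitness_get_by_key_list.1) (pvRaiseWitness_get_by_key_list.2) ∧ Raises_get_by_key_list (pvRaiseWitness_get_by_key_list.1) (pvRaiseWitness_get_by_key_list.2) ∧ get_by_key_list_alt (pvRaiseWitness_get_by_key_list.1) (pvRaiseWitness_get_by_key_list.2) = pvRaiseWitnessOut_get_by_key_list)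

-- ===== LEMMAS AND PROOFS =====
-- When no remaining key matches, A's loop just returns its carried ret.
theorem getByKeyListLoop_no_match (src : List (String × Int)) :
    ∀ (ks : List String) (found : Bool) (ret : Option Int),
      ks.filterMap (fun k => pvLookup? src k) = [] →
      getByKeyListLoop src ks found ret = some ret := by
  intro ks
  induction ks with
  | nil => intro _ _ _; rfl
  | cons k ks ih =>
    intro found ret h
    simp only [List.filterMap_cons] at h
    cases hk : pvLookup? src k with
    | some v => simp [hk] at h
    | none =>
      simp only [hk] at h
      simp [getByKeyListLoop, hk, ih found ret h]

-- With at most one match, A's loop started fresh returns the head of the keys-side match list.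
theorem getByKeyListLoop_le_one (src : List (String × Int)) :
    ∀ (ks : List String),
      (ks.filterMap (fun k => pvLookup? src k)).length ≤ 1 →
      getByKeyListLoop src ks false none =
        some (ks.filterMap (fun k => pvLookup? src k)).head? := by
  intro ks
  induction ks with
  | nil => intro _; rfl
  | cons k ks ih =>
    intro h
    simp only [List.filterMap_cons] at h ⊢
    cases hk : pvLookup? src k with
    | some v =>
      simp only [hk, List.length_cons] at h
      have h0 : (ks.filterMap (fun k => pvLookup? src k)).length = 0 := by omega
      have hnil : ks.filterMap (fun k => pvLookup? src k) = [] := List.length_eq_zero_iff.mp h0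
      simp [getByKeyListLoop, hk, getByKeyListLoop_no_match src ks true (some v) hnil, hnil]
    | none =>
      simp only [hk] at h
      simp [getByKeyListLoop, hk, ih h]

-- a filterMap whose unique hit is the (unique) element e yields exactly [v]
theorem filterMap_eq_singleton {α β : Type} {f : α → Option β} :
    ∀ (l : List α) (e : α) (v : β), l.Nodup → e ∈ l → f e = some v →
      (∀ x ∈ l, ∀ w, f x = some w → x = e) →
      l.filterMap f = [v] := by
  intro l
  induction l with
  | nil => intro e v _ he; exact absurd he (List.not_mem_nil)
  | cons a l ih =>
    intro e v hnd he hfe huniq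
    rcases List.nodup_cons.mp hnd with ⟨hna, hndl⟩
    cases ha : f a with
    | some w =>
      have hae : a = e := huniq a (List.mem_cons_self) w ha
      have hwv : w = v := by rw [hae, hfe] at ha; exact (Option.some.inj ha).symm
      have hnil : l.filterMap f = [] := by
        apply List.filterMap_eq_nil_iff.mpr
        intro x hx
        cases hfx : f x with
        | none => rfl
        | some u =>
          have : x = e := huniq x (List.mem_cons_of_mem _ hx) u hfx
          rw [this, ← hae] at hx
          exact absurd hx hna
      simp [ha, hwv, hnil]
    | none =>
      have hne : e ≠ a := by
        intro hh; rw [hh, ha] at hfe; simp at hfe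
      have hel : e ∈ l := by
        rcases List.mem_cons.mp he with h | h
        · exact absurd h hne
        · exact h
      simp only [List.filterMap_cons, ha]
      exact ih e v hndl hel hfe (fun x hx w hw => huniq x (List.mem_cons_of_mem _ hx) w hw)

-- B's source-side match list equals the keys-side match list, given ≤1 keys-side match and a dup-free dict.
theorem src_matches_eq (src : List (String × Int)) (keys : List String)
    (hle : (keys.filterMap (fun k => pvLookup? src k)).length ≤ 1)
    (hnd : (src.map Prod.fst).Nodup) :
    src.filterMap (fun p => if PySem.Set.contains (PySem.Set.ofList keys) p.1 then some p.2 else none)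
      = keys.filterMap (fun k => pvLookup? src k) := by
  have hmem : ∀ (p : String × Int), p ∈ src → p.1 ∈ keys → pvLookup? src p.1 = some p.2 := by
    intro p hp hk
    unfold pvLookup?
    cases hf : src.find? (fun q => q.1 == p.1) with
    | none =>
      exfalso
      have := List.find?_eq_none.mp hf p hp
      simp at this
    | some q =>
      have hq1 : q.1 = p.1 := by
        have := List.find?_some hf
        simpa using this
      have hqmem : q ∈ src := List.mem_of_find?_eq_some hf
      have : q = p := by
        have h2 : q.1 = p.1 → q = p := by
          intro h
          have hinj := List.inj_on_of_nodup_map hnd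
          have := hinj hqmem hp h
          exact this
        exact h2 hq1
      simp [this]
  cases hcase : keys.filterMap (fun k => pvLookup? src k) with
  | nil =>
    apply List.filterMap_eq_nil_iff.mpr
    intro p hp
    by_cases hk : p.1 ∈ keys
    · exfalso
      have hlk := hmem p hp hk
      have : pvLookup? src p.1 = none := List.filterMap_eq_nil_iff.mp hcase p.1 hk
      rw [hlk] at this; simp at this
    · simp [PySem.Set.mem_ofList, hk]
  | cons v0 rest =>
    have hrest : rest = [] := by
      rw [hcase] at hle
      simp only [List.length_cons] at hle
      exact List.length_eq_zero_iff.mp (by omega)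
    subst hrest
    -- extract the unique matching occurrence in keys
    rcases List.filterMap_eq_cons_iff.mp hcase with ⟨l1, k0, l2, hkeys, hl1, hk0, hl2⟩
    -- the unique src entry with key k0
    have hk0mem : k0 ∈ keys := by rw [hkeys]; simp
    unfold pvLookup? at hk0
    cases hf : src.find? (fun q => q.1 == k0) with
    | none => rw [hf] at hk0; simp at hk0
    | some e =>
      rw [hf] at hk0
      have he1 : e.1 = k0 := by have := List.find?_some hf; simpa using this
      have he2 : e.2 = v0 := by simpa using hk0
      have hemem : e ∈ src := List.mem_of_find?_eq_some hf
      have hnds : src.Nodup := List.Nodup.of_map _ hnd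
      have hfe : (fun p : String × Int => if PySem.Set.contains (PySem.Set.ofList keys) p.1 then some p.2 else none) e = some v0 := by
        simp [PySem.Set.mem_ofList, he1, hk0mem, he2]
      apply filterMap_eq_singleton src e v0 hnds hemem hfe
      intro x hx w hw
      -- x matches, so x.1 ∈ keys and lookup x.1 = some x.2; only k0 can match in keys
      by_cases hxk : x.1 ∈ keys
      · have hlk := hmem x hx hxk
        have hx1 : x.1 = k0 := by
          have hxk' := hxk
          rw [hkeys] at hxk'
          rcases List.mem_append.mp hxk' with h | h
          · exfalso
            have := hl1 x.1 h
            rw [hlk] at this; simp at this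
          · rcases List.mem_cons.mp h with h | h
            · exact h
            · exfalso
              have := List.filterMap_eq_nil_iff.mp hl2 x.1 h
              rw [hlk] at this; simp at this
        -- same key → same entry, by nodup of keys of src
        have hinj := List.inj_on_of_nodup_map hnd
        exact hinj hx hemem (by rw [hx1, he1])
      · exfalso
        simp [PySem.Set.mem_ofList, hxk] at hw

-- ===== VERDICT (by name: the statement is the Claim_ definition above) =====
theorem get_by_key_list_spec : Claim_equal_get_by_key_list := by
  intro src keys _ hpre
  rcases hpre with ⟨hle, hnd⟩
  unfold Spec_get_by_key_list get_by_key_list get_by_key_list_alt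
  rw [getByKeyListLoop_le_one src keys hle]
  have hn : ¬ 1 < (keys.filterMap (fun k => pvLookup? src k)).length := by omega
  simp only [src_matches_eq src keys hle hnd, hn, if_false]

@[simp] theorem get_by_key_list_raises : Claim_raises_get_by_key_list := by
  unfold Claim_raises_get_by_key_list
  constructor
  · intro src keys _ hr hpre
    rcases hr with ⟨h2, _⟩
    rcases hpre with ⟨h1, _⟩
    omega
  · exact ⟨by decide, by decide, by decide⟩
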